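-- pv_equiv track=rewrite | github.com/emadsaberbahbah-coder/tadawul-fast | routes/analysis_sheet_rows.py | _dict_is_symbol_map
-- ===== SOURCE A (Python) =====
-- from typing import Any, Dict, Iterable, List, Mapping, Optional, Sequence, Tuple
--
-- def _dict_is_symbol_map(d: Dict[str, Any], symbols: Sequence[str]) -> bool:
--     if not isinstance(d, dict) or not symbols:
--         return False
--     symset = set(symbols)
--     keys = [k for k in d.keys() if isinstance(k, str)]
--     if not keys:
--         return False
--     hit = sum(1 for k in keys if k in symset)
--     return hit == len(symset) if symset else False
-- ===== SOURCE B (Python) =====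
-- def _dict_is_symbol_map(d, symbols):
--     if not isinstance(d, dict) or not symbols:
--         return False
--     remaining = set(symbols)
--     for k in d:
--         if not remaining:
--             break
--         remaining.discard(k)
--     return not remaining
-- ===== Notes on version B (the rewrite author's own statement) =====
-- stated objective: alternative
-- what changed: B replaces A's staged count-and-compare (count dict keys hitting the symbol set, compare the count to the set size, with extra empty-keys and dead branches) by a single pass over the dict that erases each key from a shrinking 'remaining symbols' set with early exit, returning whether the set was emptied.
import Mathlib
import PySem

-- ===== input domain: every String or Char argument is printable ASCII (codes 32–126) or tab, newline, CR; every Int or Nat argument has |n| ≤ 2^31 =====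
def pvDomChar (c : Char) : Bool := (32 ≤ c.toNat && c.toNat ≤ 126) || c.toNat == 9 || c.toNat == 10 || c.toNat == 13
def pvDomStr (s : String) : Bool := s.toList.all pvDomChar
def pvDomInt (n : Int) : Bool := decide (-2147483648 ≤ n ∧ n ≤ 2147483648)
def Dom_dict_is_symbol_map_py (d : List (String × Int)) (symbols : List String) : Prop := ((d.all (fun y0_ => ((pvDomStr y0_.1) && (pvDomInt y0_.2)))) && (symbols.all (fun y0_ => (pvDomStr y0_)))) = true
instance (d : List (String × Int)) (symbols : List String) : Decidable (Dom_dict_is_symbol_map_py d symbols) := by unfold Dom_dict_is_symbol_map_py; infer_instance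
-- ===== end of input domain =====

-- B replaces A's count-and-compare over the keys by a single pass over the dict that erases each
-- key from a shrinking 'remaining symbols' set (early exit when empty) and tests emptiness.

-- ===== PORT A =====
-- literal transliteration of _dict_is_symbol_map: guard on empty symbols, build symset,
-- collect the (string) keys, guard on empty keys, count keys hitting symset, compare to len(symset).
-- (the isinstance(d, dict) / isinstance(k, str) checks are always true under the typed signature)
def dict_is_symbol_map_py (d : List (String × Int)) (symbols : List String) : Bool :=
  if symbols.isEmpty then false
  else
    let symset : PySem.Set String := PySem.Set.ofList symbols
    let keys : List String := (PySem.Dict.ofList d).keys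
    if keys.isEmpty then false
    else
      let hit : Nat := keys.countP (fun k => symset.contains k)
      if symset.isEmpty then false else hit == symset.length

-- ===== PORT B =====
-- the 'for k in d: if not remaining: break; remaining.discard(k)' loop of Source B
def pvRemLoop (rem : PySem.Set String) (ks : List String) : PySem.Set String :=
  match ks with
  | [] => rem
  | k :: ks => if rem.isEmpty then rem else pvRemLoop (PySem.Set.discard rem k) ks

def dict_is_symbol_map_py_alt (d : List (String × Int)) (symbols : List String) : Bool :=
  if symbols.isEmpty then false
  else
    let remaining : PySem.Set String := PySem.Set.ofList symbols
    let final := pvRemLoop remaining (PySem.Dict.ofList d).keys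
    final.isEmpty

-- ===== PRECONDITION & SPEC =====
def Spec_dict_is_symbol_map_py (d : List (String × Int)) (symbols : List String) (out : Bool) : Prop := out = dict_is_symbol_map_py_alt d symbols
instance (d : List (String × Int)) (symbols : List String) (out : Bool) : Decidable (Spec_dict_is_symbol_map_py d symbols out) := by unfold Spec_dict_is_symbol_map_py; infer_instance

-- ===== CLAIM (what is proved, stated in full; the proofs are below) =====
def Claim_equal_dict_is_symbol_map_py : Prop := ∀ (d : List (String × Int)) (symbols : List String), Dom_dict_is_symbol_map_py d symbols → Spec_dict_is_symbol_map_py d symbols (dict_is_symbol_map_py d symbols)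

-- ===== LEMMAS AND PROOFS =====

-- the keys of dict(d) are the distinct first components of d, in first-insertion order
lemma keys_ofList_eq (d : List (String × Int)) :
    (PySem.Dict.ofList d).keys = PySem.Set.ofList (d.map Prod.fst) := by
  show ((d.foldl (fun acc p => acc.insert p.1 p.2) PySem.Dict.empty)).keys = _
  rw [PySem.Dict.keys_foldl_insert_key]
  simp [PySem.Set.update, PySem.Set.ofList_eq_foldl, PySem.Dict.keys_empty]

-- the loop computes the set difference rem \ ks (membership-wise), given rem duplicate-free
lemma mem_pvRemLoop (ks : List String) (rem : List String) (hn : rem.Nodup) (x : String) :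
    x ∈ pvRemLoop rem ks ↔ x ∈ rem ∧ x ∉ ks := by
  induction ks generalizing rem with
  | nil => simp [pvRemLoop]
  | cons k ks ih =>
    by_cases h : rem.isEmpty
    · have hnil : rem = [] := List.isEmpty_iff.mp h
      simp [pvRemLoop, hnil]
    · rw [pvRemLoop, if_neg h, ih _ (PySem.Set.nodup_discard rem k hn), PySem.Set.mem_discard]
      simp only [List.mem_cons]
      tauto

-- counting the elements of a duplicate-free K that lie in a duplicate-free S reaches |S| exactly
-- when S ⊆ K
lemma count_hits_eq_iff {K S : List String} (hK : K.Nodup) (hS : S.Nodup) :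
    K.countP (fun k => decide (k ∈ S)) = S.length ↔ ∀ s ∈ S, s ∈ K := by
  rw [List.countP_eq_length_filter]
  have hfn : (K.filter (fun k => decide (k ∈ S))).Nodup := hK.filter _
  rw [← List.toFinset_card_of_nodup hfn, ← List.toFinset_card_of_nodup hS]
  rw [List.toFinset_filter]
  have : K.toFinset.filter (fun k => decide (k ∈ S) = true) = K.toFinset ∩ S.toFinset := by
    ext x; simp [Finset.mem_filter, Finset.mem_inter]
  rw [this]
  constructor
  · intro h s hs
    have heq : K.toFinset ∩ S.toFinset = S.toFinset :=
      Finset.eq_of_subset_of_card_le Finset.inter_subset_right (le_of_eq h.symm)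
    have hmem : s ∈ K.toFinset ∩ S.toFinset := heq.symm ▸ List.mem_toFinset.mpr hs
    exact List.mem_toFinset.mp (Finset.mem_inter.mp hmem).1
  · intro h
    have : K.toFinset ∩ S.toFinset = S.toFinset := by
      apply Finset.inter_eq_right.mpr
      intro x hx
      exact List.mem_toFinset.mpr (h x (List.mem_toFinset.mp hx))
    rw [this]

-- B's result is 'true' exactly when every symbol is a key
lemma alt_isEmpty_iff (K S : List String) (hS : S.Nodup) :
    (pvRemLoop S K).isEmpty = true ↔ ∀ s ∈ S, s ∈ K := by
  rw [List.isEmpty_iff, List.eq_nil_iff_forall_not_mem]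
  constructor
  · intro h s hs
    by_contra hk
    exact h s ((mem_pvRemLoop K S hS s).mpr ⟨hs, hk⟩)
  · intro h x hx
    obtain ⟨hxS, hxK⟩ := (mem_pvRemLoop K S hS x).mp hx
    exact hxK (h x hxS)

-- ===== VERDICT (by name: the statement is the Claim_ definition above) =====
theorem dict_is_symbol_map_py_spec : Claim_equal_dict_is_symbol_map_py := by
  intro d symbols _
  unfold Spec_dict_is_symbol_map_py dict_is_symbol_map_py dict_is_symbol_map_py_alt
  by_cases hsym : symbols.isEmpty
  · simp [hsym]
  · simp only [hsym, if_false, Bool.false_eq_true]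
    rw [keys_ofList_eq]
    have hsne : symbols ≠ [] := by simpa [List.isEmpty_iff] using hsym
    set S : List String := PySem.Set.ofList symbols with hSdef
    set K : List String := PySem.Set.ofList (d.map Prod.fst) with hKdef
    have hSnodup : S.Nodup := PySem.Set.nodup_ofList _
    have hKnodup : K.Nodup := PySem.Set.nodup_ofList _
    have hmemS : ∀ x, x ∈ S ↔ x ∈ symbols := fun x => PySem.Set.mem_ofList _ _
    have hSne : ¬ S.isEmpty := by
      obtain ⟨a, ha⟩ := List.exists_mem_of_ne_nil symbols hsne
      intro h
      have haS := (hmemS a).mpr ha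
      rw [List.isEmpty_iff.mp h] at haS
      exact List.not_mem_nil haS
    have hSnil : S ≠ [] := fun h => hSne (List.isEmpty_iff.mpr h)
    by_cases hK : K.isEmpty
    · have hKnil : K = [] := List.isEmpty_iff.mp hK
      simp only [hK, if_true]
      symm
      rw [Bool.eq_false_iff]
      intro hB
      obtain ⟨a, ha⟩ := List.exists_mem_of_ne_nil S hSnil
      have := (alt_isEmpty_iff K S hSnodup).mp hB a ha
      simp [hKnil] at this
    · simp only [hK, hSne, Bool.false_eq_true, if_false]
      have hcontS : (fun k => PySem.Set.contains S k) = (fun k => decide (k ∈ S)) := by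
        funext k; simp [PySem.Set.contains]
      rw [hcontS]
      rcases Nat.decEq (K.countP (fun k => decide (k ∈ S))) S.length with h | h
      · rw [beq_eq_false_iff_ne.mpr h]
        symm
        rw [Bool.eq_false_iff]
        intro hB
        exact h ((count_hits_eq_iff hKnodup hSnodup).mpr ((alt_isEmpty_iff K S hSnodup).mp hB))
      · rw [beq_iff_eq.mpr h]
        symm
        exact (alt_isEmpty_iff K S hSnodup).mpr ((count_hits_eq_iff hKnodup hSnodup).mp h)
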